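-- pv_equiv track=rewrite | github.com/PedroPinto27/PL2025-A104176 | TPC2/tpc2.py | musicasPorPeriodo
-- ===== SOURCE A (Python) =====
-- def musicasPorPeriodo(dados):
--     dict={}
--     posicao = dados[0].index("periodo")
--     for linha in dados[1:]:
--         key = linha[posicao]
--         if key in dict:
--             dict[key] += 1
--         else:
--             dict[key] = 1
--
--     return dict
-- ===== SOURCE B (Python) =====
-- def musicasPorPeriodo(dados):
--     posicao = dados[0].index("periodo")
--     keys = [linha[posicao] for linha in dados[1:]]
--     result = {}
--     while keys:
--         k = keys[0]
--         result[k] = sum(1 for x in keys if x == k)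
--         keys = [x for x in keys if x != k]
--     return result
-- ===== Notes on version B (the rewrite author's own statement) =====
-- stated objective: alternative
-- what changed: Replaces the single-pass dict-accumulator loop by a take-first-key / count-it / remove-all-its-occurrences / recurse scheme over the extracted key column, so no dictionary is consulted during counting.
import Mathlib
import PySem

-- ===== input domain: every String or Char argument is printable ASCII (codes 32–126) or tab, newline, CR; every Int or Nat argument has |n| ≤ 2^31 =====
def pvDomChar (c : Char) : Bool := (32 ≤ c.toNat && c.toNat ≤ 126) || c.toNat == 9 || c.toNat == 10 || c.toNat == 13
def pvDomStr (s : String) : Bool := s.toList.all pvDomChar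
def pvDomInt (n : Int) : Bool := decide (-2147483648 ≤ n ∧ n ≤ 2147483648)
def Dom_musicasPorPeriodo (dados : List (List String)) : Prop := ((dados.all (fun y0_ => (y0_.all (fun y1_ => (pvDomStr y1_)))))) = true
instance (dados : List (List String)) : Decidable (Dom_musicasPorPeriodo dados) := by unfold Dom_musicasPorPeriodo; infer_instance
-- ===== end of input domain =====

-- B replaces A's single-pass dict-accumulator loop by a take-first-key / count / remove / recurse
-- pass over the extracted key column (alternative decomposition, same results).

-- ===== PORT A =====
-- literal transliteration: dict accumulator, posicao = dados[0].index("periodo"), one counting pass over dados[1:]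
def musicasPorPeriodo (dados : List (List String)) : List (String × Int) :=
  match dados with
  | [] => []  -- dados[0] raises IndexError; excluded by Pre_
  | header :: rest =>
    match PySem.List.index? header "periodo" with
    | none => []  -- .index raises ValueError; excluded by Pre_
    | some posicao =>
      (rest.foldl (fun d linha =>
          let key := PySem.List.pyGetD linha (posicao : Int) ""  -- linha[posicao]; in range under Pre_
          if d.contains key then d.insert key (d.getD key 0 + 1)
          else d.insert key 1) PySem.Dict.empty).items

-- ===== PORT B =====
-- literal transliteration of Source B's while loop: take the first remaining key, count its
-- occurrences over the remaining key list, drop all of them, repeat on the shorter list.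
def pvCountFirst (keys : List String) : List (String × Int) :=
  match keys with
  | [] => []
  | k :: t =>
    (k, ((k :: t).count k : Int)) :: pvCountFirst (t.filter (fun x => x != k))
termination_by keys.length
decreasing_by
  simp only [List.length_unattach, List.length_cons]
  exact Nat.lt_succ_of_le (le_trans (List.length_filter_le _ _) (by simp))

def musicasPorPeriodo_alt (dados : List (List String)) : List (String × Int) :=
  match dados with
  | [] => []  -- dados[0] raises IndexError; excluded by Pre_
  | header :: rest =>
    match PySem.List.index? header "periodo" with
    | none => []  -- .index raises ValueError; excluded by Pre_
    | some posicao =>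
      pvCountFirst (rest.map (fun linha => PySem.List.pyGetD linha (posicao : Int) ""))

-- ===== PRECONDITION & SPEC =====
-- Pre_: exactly where the Python A returns normally — a nonempty table whose header contains
-- "periodo" and whose data rows are all long enough for that column.
def Pre_musicasPorPeriodo (dados : List (List String)) : Prop :=
  match dados with
  | [] => False
  | header :: rest => "periodo" ∈ header ∧ ∀ linha ∈ rest, header.idxOf "periodo" < linha.length
instance (dados : List (List String)) : Decidable (Pre_musicasPorPeriodo dados) := by
  unfold Pre_musicasPorPeriodo; cases dados <;> infer_instance

def pvWitness_musicasPorPeriodo : List (List String) :=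
  [["x", "periodo"], ["1", "a"], ["2", "b"], ["3", "a"]]

def Spec_musicasPorPeriodo (dados : List (List String)) (out : List (String × Int)) : Prop := out = musicasPorPeriodo_alt dados
instance (dados : List (List String)) (out : List (String × Int)) : Decidable (Spec_musicasPorPeriodo dados out) := by unfold Spec_musicasPorPeriodo; infer_instance

-- ===== CLAIM (what is proved, stated in full; the proofs are below) =====
def Claim_equal_musicasPorPeriodo : Prop := ∀ (dados : List (List String)), Dom_musicasPorPeriodo dados → Pre_musicasPorPeriodo dados → Spec_musicasPorPeriodo dados (musicasPorPeriodo dados)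

-- ===== LEMMAS AND PROOFS =====

-- A's branching counting step is the unconditional insert-with-increment step.
theorem step_eq (d : PySem.Dict String Int) (key : String) :
    (if d.contains key then d.insert key (d.getD key 0 + 1) else d.insert key 1)
      = d.insert key (d.getD key 0 + 1) := by
  by_cases h : d.contains key = true
  · simp [h]
  · have h' : d.contains key = false := by simpa using h
    rw [if_neg (by simp [h']), PySem.Dict.getD_of_not_contains d 0 h']; norm_num

-- A's counting loop over the rows builds exactly Counter of the key column.
theorem loop_eq (l : List (List String)) (p : Nat) :
    l.foldl (fun (d : PySem.Dict String Int) linha =>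
        let key := PySem.List.pyGetD linha (p : Int) ""
        if d.contains key then d.insert key (d.getD key 0 + 1) else d.insert key 1)
      PySem.Dict.empty
      = PySem.Dict.counter (l.map (fun linha => PySem.List.pyGetD linha (p : Int) "")) := by
  rw [← PySem.Dict.foldl_insert_getD_add_one_eq_counter, List.foldl_map]
  congr 1
  funext d linha
  exact step_eq d (PySem.List.pyGetD linha (p : Int) "")

-- Adding x to a set that already contains it is a no-op; otherwise it appends.
theorem foldl_add_filter {α : Type} [BEq α] [LawfulBEq α] (a : α) :
    ∀ (l : List α) (s : PySem.Set α), a ∈ s →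
      List.foldl PySem.Set.add s l = List.foldl PySem.Set.add s (l.filter (fun x => x != a)) := by
  intro l
  induction l with
  | nil => intro s _; rfl
  | cons x t ih =>
    intro s hs
    by_cases hx : x = a
    · subst hx
      have hc : PySem.Set.add s x = s := by
        simp [PySem.Set.add, PySem.Set.contains, hs]
      simp [List.filter, hc, ih s hs]
    · have hmem : a ∈ PySem.Set.add s x := by
        simp [PySem.Set.add]; split <;> simp [hs]
      rw [List.filter_cons_of_pos (by simp [hx])]
      simp only [List.foldl]
      exact (ih (PySem.Set.add s x) hmem).symm ▸ rfl

theorem foldl_add_cons {α : Type} [BEq α] [LawfulBEq α] (a : α) :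
    ∀ (l : List α) (s : PySem.Set α), (∀ x ∈ l, x ≠ a) →
      List.foldl PySem.Set.add (a :: s) l = a :: List.foldl PySem.Set.add s l := by
  intro l
  induction l with
  | nil => intro s _; rfl
  | cons x t ih =>
    intro s h
    have hx : x ≠ a := h x (by simp)
    have hadd : PySem.Set.add (a :: s) x = a :: PySem.Set.add s x := by
      simp [PySem.Set.add, PySem.Set.contains, hx]
      split <;> simp
    simp only [List.foldl, hadd]
    exact ih (PySem.Set.add s x) (fun y hy => h y (by simp [hy]))

-- Python's set(xs) in first-occurrence order, destructured at the head key.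
theorem ofList_cons {α : Type} [BEq α] [LawfulBEq α] (a : α) (l : List α) :
    PySem.Set.ofList (a :: l) = a :: PySem.Set.ofList (l.filter (fun x => x != a)) := by
  simp only [PySem.Set.ofList_eq_foldl, List.foldl]
  have h1 : PySem.Set.add [] a = [a] := rfl
  rw [h1, foldl_add_filter a l [a] (by simp)]
  exact foldl_add_cons a _ [] (by intro x hx; simpa using (List.of_mem_filter hx))

-- B's take-count-remove recursion produces exactly Counter(keys).items.
theorem pvCountFirst_eq (keys : List String) :
    pvCountFirst keys
      = (PySem.Set.ofList keys).map (fun k => (k, (keys.count k : Int))) := by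
  induction hn : keys.length using Nat.strong_induction_on generalizing keys with
  | _ n ih =>
  match keys, hn with
  | [], _ => rw [pvCountFirst]; rfl
  | k :: t, hn =>
    rw [pvCountFirst, ofList_cons, List.map_cons,
      ih ((t.filter (fun x => x != k)).length)
        (by rw [← hn]; exact Nat.lt_succ_of_le (List.length_filter_le _ t)) _ rfl]
    congr 1
    apply List.map_congr_left
    intro k' hk'
    have hkmem : k' ∈ t.filter (fun x => x != k) := by
      simpa [PySem.Set.mem_ofList] using hk'
    have hne : k' ≠ k := by
      have := List.of_mem_filter hkmem
      simpa using this
    have hcount : (t.filter (fun x => x != k)).count k' = (k :: t).count k' := by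
      rw [List.count_filter (by simpa using hne)]
      simp [Ne.symm hne]
    rw [hcount]


-- ===== VERDICT (by name: the statement is the Claim_ definition above) =====
theorem musicasPorPeriodo_spec : Claim_equal_musicasPorPeriodo := by
  intro dados _ hPre
  unfold Spec_musicasPorPeriodo
  cases dados with
  | nil => exact absurd hPre (by simp [Pre_musicasPorPeriodo])
  | cons header rest =>
    cases h : PySem.List.index? header "periodo" with
    | none =>
      exfalso
      rw [PySem.List.index?_eq_none_iff] at h
      exact h hPre.1
    | some posicao =>
      simp only [musicasPorPeriodo, musicasPorPeriodo_alt, h]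
      rw [loop_eq rest posicao, PySem.Dict.items_counter, pvCountFirst_eq]
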